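-- pv_equiv track=rewrite | github.com/octantbio/SwabSeq | src/plate_maps.py | get_plate_sizes
-- ===== SOURCE A (Python) =====
-- from collections import defaultdict
--
-- def get_plate_sizes(plate_maps):
--     plate_sizes = defaultdict(set)
--
--     #var_names = set()
--     for var_name, plates in plate_maps.items():
--         for plate_id, val in plates.items():
--             #var_names.add(var_name)
--             plate_sizes[plate_id].add(len(plate_maps[var_name][plate_id]))
--
--     bad_size_plates = [plate for plate,sizes in plate_sizes.items() if len(sizes) > 1]
--     if len(bad_size_plates) > 0:
--         raise RuntimeError('The following plates have different sizes across the variables:\n{}'.format("\n".join(bad_size_plates)))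
--     plate_sizes = {plate_id: list(size)[0] for plate_id, size in plate_sizes.items()}
--
--     return plate_sizes
-- ===== SOURCE B (Python) =====
-- def get_plate_sizes(plate_maps):
--     # Staged pipeline over a flat (plate, size) list instead of a defaultdict-of-sets accumulator.
--     entries = [(pid, len(val)) for plates in plate_maps.values() for pid, val in plates.items()]
--     order = []
--     for pid, _ in entries:
--         if pid not in order:
--             order.append(pid)
--     bad_size_plates = [p for p in order if len({s for q, s in entries if q == p}) > 1]
--     if bad_size_plates:
--         raise RuntimeError('The following plates have different sizes across the variables:\n{}'.format("\n".join(bad_size_plates)))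
--     return {p: next(s for q, s in entries if q == p) for p in order}
-- ===== Notes on version B (the rewrite author's own statement) =====
-- stated objective: alternative
-- what changed: B replaces A's single-pass defaultdict-of-sets accumulation with a staged pipeline: it first flattens everything into one flat (plate, size) list, then derives the plate order by first-occurrence dedup, checks consistency by a per-plate scan of the flat list, and picks each plate's first size by another per-plate scan -- no per-plate set accumulator at all.
import Mathlib
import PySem

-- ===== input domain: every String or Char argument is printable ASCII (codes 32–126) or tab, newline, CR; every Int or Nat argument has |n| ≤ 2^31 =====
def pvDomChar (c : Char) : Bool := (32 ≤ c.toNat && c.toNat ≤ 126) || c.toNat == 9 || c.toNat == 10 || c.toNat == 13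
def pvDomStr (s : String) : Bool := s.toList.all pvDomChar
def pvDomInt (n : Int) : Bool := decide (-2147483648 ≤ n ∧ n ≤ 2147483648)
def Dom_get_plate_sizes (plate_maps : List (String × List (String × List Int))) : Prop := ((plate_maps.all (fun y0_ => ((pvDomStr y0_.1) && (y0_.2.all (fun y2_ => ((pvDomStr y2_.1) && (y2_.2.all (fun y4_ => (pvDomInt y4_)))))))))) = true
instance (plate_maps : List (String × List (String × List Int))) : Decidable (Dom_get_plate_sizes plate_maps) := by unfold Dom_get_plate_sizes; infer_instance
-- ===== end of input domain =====

-- B replaces A's defaultdict-of-sets accumulation by a staged pipeline over a flat (plate, size) list: same result, different decomposition (not faster).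


-- The Python argument is a dict of dicts; the assoc-list argument is canonicalised with Python's
-- duplicate-key rule (last value wins, first position kept) exactly as PySem.Dict.ofList does.
def pvToDict (plate_maps : List (String × List (String × List Int))) :
    PySem.Dict String (PySem.Dict String (List Int)) :=
  PySem.Dict.ofList (plate_maps.map (fun vp => (vp.1, PySem.Dict.ofList vp.2)))

-- ===== PORT A =====
-- defaultdict(set): modify with default Set.empty.  len(plate_maps[var_name][plate_id]) is ported by the
-- double lookup (getD defaults can never fire: both keys are present).  The RuntimeError branch returns []
-- (outside Pre_).  list(size)[0] is ported as element 0 of the set's list: under Pre_ the set is a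
-- singleton, so Python's set iteration order is irrelevant; the getD 0 default can never fire.
def get_plate_sizes (plate_maps : List (String × List (String × List Int))) : List (String × Int) :=
  let pm := pvToDict plate_maps
  let plate_sizes : PySem.Dict String (PySem.Set Int) :=
    pm.items.foldl (fun d vp =>
      vp.2.items.foldl (fun d pv =>
        d.modify pv.1 PySem.Set.empty (fun s =>
          PySem.Set.add s ((((pm.get? vp.1).getD PySem.Dict.empty).get? pv.1 |>.getD []).length : Int))) d)
      PySem.Dict.empty
  let bad_size_plates := (plate_sizes.items.filter (fun ps => PySem.Set.len ps.2 > 1)).map (·.1)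
  if bad_size_plates.length > 0 then []  -- raise RuntimeError
  else plate_sizes.items.map (fun ps => (ps.1, (PySem.List.pyGet? ps.2 0).getD 0))

-- ===== PORT B =====
-- Staged pipeline: flat (plate, size) entry list; order by first-occurrence dedup; the set comprehension
-- {s for q,s in entries if q == p} is Set.ofList of the mapped filter; next(...) is the head of the
-- filtered list (headD's default never fires: p ∈ order means the filter is nonempty).
-- The RuntimeError branch returns [] (outside Pre_).
def get_plate_sizes_alt (plate_maps : List (String × List (String × List Int))) : List (String × Int) :=
  let pm := pvToDict plate_maps
  let entries : List (String × Int) :=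
    pm.values.flatMap (fun plates => plates.items.map (fun pv => (pv.1, (pv.2.length : Int))))
  let order : List String :=
    entries.foldl (fun o e => if o.contains e.1 then o else o ++ [e.1]) []
  let bad_size_plates :=
    order.filter (fun p =>
      PySem.Set.len (PySem.Set.ofList ((entries.filter (fun q => q.1 == p)).map (·.2))) > 1)
  if bad_size_plates.length > 0 then []  -- raise RuntimeError
  else order.map (fun p => (p, ((entries.filter (fun q => q.1 == p)).map (·.2)).headD 0))

-- ===== PRECONDITION & SPEC =====
-- The (plate_id, size) entries the Python loops visit, in visiting order.
def pvEntries (plate_maps : List (String × List (String × List Int))) : List (String × Int) :=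
  (pvToDict plate_maps).items.flatMap (fun vp => vp.2.items.map (fun pv => (pv.1, (pv.2.length : Int))))

-- Pre_ excludes exactly the inputs on which A raises RuntimeError: some plate_id carries two
-- different sizes across the variables (after Python's dict key collapsing).
def Pre_get_plate_sizes (plate_maps : List (String × List (String × List Int))) : Prop :=
  (pvEntries plate_maps).Pairwise (fun a b => a.1 = b.1 → a.2 = b.2)
instance (plate_maps : List (String × List (String × List Int))) : Decidable (Pre_get_plate_sizes plate_maps) := by unfold Pre_get_plate_sizes; infer_instance

def pvWitness_get_plate_sizes : (List (String × List (String × List Int))) :=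
  [("bc", [("p1", [7, 8]), ("p2", [3])]), ("primer", [("p1", [1, 2]), ("p2", [9])])]

def Spec_get_plate_sizes (plate_maps : List (String × List (String × List Int))) (out : List (String × Int)) : Prop := out = get_plate_sizes_alt plate_maps
instance (plate_maps : List (String × List (String × List Int))) (out : List (String × Int)) : Decidable (Spec_get_plate_sizes plate_maps out) := by unfold Spec_get_plate_sizes; infer_instance

-- ===== CLAIM (what is proved, stated in full; the proofs are below) =====
def Claim_equal_get_plate_sizes : Prop := ∀ (plate_maps : List (String × List (String × List Int))), Dom_get_plate_sizes plate_maps → Pre_get_plate_sizes plate_maps → Spec_get_plate_sizes plate_maps (get_plate_sizes plate_maps)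

-- ===== LEMMAS AND PROOFS =====

-- every value stored in a fold-of-inserts comes from the initial dict or the list
theorem values_foldl_insert_mem {κ ν : Type} [BEq κ] [LawfulBEq κ]
    (l : List (κ × ν)) (d : PySem.Dict κ ν) (w : ν)
    (h : w ∈ (l.foldl (fun d p => d.insert p.1 p.2) d).values) :
    w ∈ d.values ∨ ∃ p ∈ l, w = p.2 := by
  induction l generalizing d with
  | nil => exact Or.inl h
  | cons x xs ih =>
    rcases ih (d.insert x.1 x.2) h with h' | ⟨p, hp, rfl⟩
    · rcases PySem.Dict.mem_values_insert d x.1 x.2 w h' with rfl | h''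
      · exact Or.inr ⟨x, List.mem_cons_self, rfl⟩
      · exact Or.inl h''
    · exact Or.inr ⟨p, List.mem_cons_of_mem _ hp, rfl⟩

theorem pvToDict_inner_nodup (plate_maps : List (String × List (String × List Int)))
    {vp : String × PySem.Dict String (List Int)} (h : vp ∈ (pvToDict plate_maps).items) :
    vp.2.keys.Nodup := by
  have hv : vp.2 ∈ (pvToDict plate_maps).values := List.mem_map_of_mem h
  have hv' : vp.2 ∈ ((plate_maps.map (fun vp => (vp.1, PySem.Dict.ofList vp.2))).foldl
      (fun d p => d.insert p.1 p.2) PySem.Dict.empty).values := hv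
  have := values_foldl_insert_mem (plate_maps.map (fun vp => (vp.1, PySem.Dict.ofList vp.2)))
      PySem.Dict.empty vp.2 hv'
  rcases this with h' | ⟨p, hp, hp2⟩
  · simp [PySem.Dict.values, PySem.Dict.empty] at h'
  · rcases List.mem_map.mp hp with ⟨q, _, rfl⟩
    rw [hp2]
    exact PySem.Dict.nodup_keys_ofList _

-- two assoc-list entries with the same key are equal when the keys are Nodup
theorem pv_eq_of_fst_eq {α β : Type} (F : List (α × β)) (h : (F.map Prod.fst).Nodup)
    {r q : α × β} (hr : r ∈ F) (hq : q ∈ F) (he : r.1 = q.1) : r = q := by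
  induction F with
  | nil => cases hr
  | cons x xs ih =>
    simp only [List.map_cons, List.nodup_cons] at h
    rcases List.mem_cons.mp hr with rfl | hr' <;> rcases List.mem_cons.mp hq with h2 | hq'
    · exact h2.symm
    · exact absurd (show r.1 ∈ xs.map Prod.fst from he ▸ List.mem_map_of_mem hq') h.1
    · exact absurd (show r.1 ∈ xs.map Prod.fst from List.mem_map_of_mem hr')
        (by rw [h2] at he; exact he ▸ h.1)
    · exact ih h.2 hr' hq'

-- A's loop body and B's reference "first occurrences" step, named for the induction.
def pvStepA (d : PySem.Dict String (PySem.Set Int)) (pn : String × Int) :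
    PySem.Dict String (PySem.Set Int) :=
  d.modify pn.1 PySem.Set.empty (fun s => PySem.Set.add s pn.2)

def pvStepF (F : List (String × Int)) (e : String × Int) : List (String × Int) :=
  if F.any (fun q => q.1 == e.1) then F else F ++ [e]

-- Main A-side invariant: along consistent entries, A's dict holds exactly the singleton sets
-- of the first-occurrence list.
theorem pv_mainA (es : List (String × Int)) (d : PySem.Dict String (PySem.Set Int))
    (F : List (String × Int))
    (hnd : (F.map Prod.fst).Nodup)
    (inv : d.items = F.map (fun pn => (pn.1, ([pn.2] : List Int))))
    (hP : ∀ e ∈ es, ∀ q ∈ F, q.1 = e.1 → q.2 = e.2)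
    (hpw : es.Pairwise (fun a b => a.1 = b.1 → a.2 = b.2)) :
    (es.foldl pvStepA d).items =
      (es.foldl pvStepF F).map (fun pn => (pn.1, ([pn.2] : List Int))) := by
  induction es generalizing d F with
  | nil => exact inv
  | cons e rest ih =>
    have hkeys : d.keys = F.map Prod.fst := by
      simp only [PySem.Dict.keys, inv, List.map_map]; rfl
    have hdnd : d.keys.Nodup := by rw [hkeys]; exact hnd
    by_cases hc : F.any (fun q => q.1 == e.1) = true
    · -- key already present: both steps leave the state unchanged
      rcases List.any_eq_true.mp hc with ⟨q, hqF, hq1⟩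
      have hq1' : q.1 = e.1 := by simpa using hq1
      have hqe : q.2 = e.2 := hP e List.mem_cons_self q hqF hq1'
      have hdmem : (e.1, ([q.2] : List Int)) ∈ d.items := by
        rw [inv]
        have := List.mem_map_of_mem (f := fun pn => (pn.1, ([pn.2] : List Int))) hqF
        simpa [hq1'] using this
      have hdc : d.contains e.1 = true := by
        rw [PySem.Dict.contains_eq_decide_mem_keys, hkeys]
        exact decide_eq_true (hq1' ▸ List.mem_map_of_mem hqF)
      have hgetD : d.getD e.1 PySem.Set.empty = [q.2] :=
        PySem.Dict.getD_of_mem_items d hdmem hdnd _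
      have hA : pvStepA d e = d := by
        apply PySem.Dict.ext
        show (d.insert e.1 (PySem.Set.add (d.getD e.1 PySem.Set.empty) e.2)).items = d.items
        rw [hgetD, hqe, PySem.Set.add_of_mem (List.mem_singleton.mpr rfl),
            PySem.Dict.items_insert_of_contains d _ hdc]
        have hid : ∀ r' ∈ d.items,
            (fun p => if (p.1 == e.1) = true then (e.1, ([e.2] : List Int)) else p) r' = id r' := by
          intro r' hr'
          by_cases hrk : r'.1 = e.1
          · simp only [hrk, beq_self_eq_true, if_true, id]
            rw [inv] at hr'
            rcases List.mem_map.mp hr' with ⟨r, hrF, rfl⟩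
            have hrq : r = q := pv_eq_of_fst_eq F hnd hrF hqF (by simpa [hq1'] using hrk)
            rw [hrq, hq1', hqe]
          · simp [hrk]
        rw [List.map_congr_left hid, List.map_id]
      have hF : pvStepF F e = F := by unfold pvStepF; simp [hc]
      rw [List.foldl_cons, List.foldl_cons, hA, hF]
      exact ih d F hnd inv (fun x hx => hP x (List.mem_cons_of_mem _ hx)) (List.Pairwise.of_cons hpw)
    · -- new key: both steps append
      have hc' : ∀ q ∈ F, ¬ (q.1 = e.1) := by
        intro q hq hqe
        exact hc (List.any_eq_true.mpr ⟨q, hq, by simp [hqe]⟩)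
      have hdc : d.contains e.1 = false := by
        rw [PySem.Dict.contains_eq_decide_mem_keys, hkeys]
        apply decide_eq_false
        intro hm
        rcases List.mem_map.mp hm with ⟨r, hr, hr1⟩
        exact hc' r hr hr1
      have hA : pvStepA d e = d.insert e.1 ([e.2] : List Int) := by
        show d.insert e.1 (PySem.Set.add (d.getD e.1 PySem.Set.empty) e.2) = _
        rw [PySem.Dict.getD_of_not_contains d _ hdc]
        rfl
      have hF : pvStepF F e = F ++ [e] := by unfold pvStepF; simp only [hc]; rfl
      rw [List.foldl_cons, List.foldl_cons, hA, hF]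
      apply ih
      · rw [List.map_append, List.nodup_append]
        refine ⟨hnd, List.nodup_singleton _, ?_⟩
        intro x hx y hy
        have hy1 : y = e.1 := by simpa using hy
        rcases List.mem_map.mp hx with ⟨r, hr, hr1⟩
        intro hxy
        exact hc' r hr (hr1.trans (hxy.trans hy1))
      · rw [PySem.Dict.items_insert_of_not_contains d _ hdc, inv, List.map_append]
        rfl
      · intro x hx q hq
        rcases List.mem_append.mp hq with hq' | hq'
        · exact hP x (List.mem_cons_of_mem _ hx) q hq'
        · have : q = e := List.mem_singleton.mp hq'
          subst this
          exact (List.pairwise_cons.mp hpw).1 x hx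
      · exact List.Pairwise.of_cons hpw

-- A's nested loop is the fold of pvStepA over pvEntries (the double lookup resolves to the value at hand).
theorem pvA_loop (plate_maps : List (String × List (String × List Int))) :
    ((pvToDict plate_maps).items.foldl (fun d vp =>
      vp.2.items.foldl (fun d pv =>
        d.modify pv.1 PySem.Set.empty (fun s =>
          PySem.Set.add s (((((pvToDict plate_maps).get? vp.1).getD PySem.Dict.empty).get? pv.1 |>.getD []).length : Int))) d)
      PySem.Dict.empty)
    = (pvEntries plate_maps).foldl pvStepA PySem.Dict.empty := by
  unfold pvEntries
  rw [List.foldl_flatMap]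
  apply PySem.List.foldl_congr_mem
  intro d vp hvp
  rw [List.foldl_map]
  apply PySem.List.foldl_congr_mem
  intro d' pv hpv
  have h1 : (pvToDict plate_maps).get? vp.1 = some vp.2 :=
    PySem.Dict.get?_of_mem_items _ hvp (PySem.Dict.nodup_keys_ofList _)
  have h2 : vp.2.get? pv.1 = some pv.2 :=
    PySem.Dict.get?_of_mem_items _ hpv (pvToDict_inner_nodup plate_maps hvp)
  rw [h1]
  simp only [Option.getD_some, h2]
  rfl

-- B's flat entry list is pvEntries.
theorem pvB_entries (plate_maps : List (String × List (String × List Int))) :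
    ((pvToDict plate_maps).values.flatMap
      (fun plates => plates.items.map (fun pv => (pv.1, (pv.2.length : Int)))))
    = pvEntries plate_maps := by
  unfold pvEntries
  simp only [PySem.Dict.values, List.flatMap_map]

-- membership of a key in the key list, as B's `p not in order` test sees it
theorem pv_contains_map_fst (F : List (String × Int)) (x : String) :
    (F.map Prod.fst).contains x = F.any (fun q => q.1 == x) := by
  induction F with
  | nil => rfl
  | cons a t ih =>
    simp only [List.map_cons, List.contains_cons, List.any_cons, ih]
    rw [BEq.comm]

-- B's order loop computes the keys of the first-occurrence list.
theorem pv_order (es : List (String × Int)) (F : List (String × Int)) :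
    es.foldl (fun o e => if o.contains e.1 then o else o ++ [e.1]) (F.map Prod.fst)
      = (es.foldl pvStepF F).map Prod.fst := by
  induction es generalizing F with
  | nil => rfl
  | cons e rest ih =>
    rw [List.foldl_cons, List.foldl_cons, pv_contains_map_fst]
    by_cases hc : F.any (fun q => q.1 == e.1) = true
    · have hstep : pvStepF F e = F := by simp [pvStepF, hc]
      rw [hc, if_pos rfl, hstep]
      exact ih F
    · simp only [Bool.not_eq_true] at hc
      have hstep : pvStepF F e = F ++ [e] := by simp [pvStepF, hc]
      rw [hc, hstep]
      simp only [Bool.false_eq_true, if_false]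
      have hm : F.map Prod.fst ++ [e.1] = (F ++ [e]).map Prod.fst := by simp
      rw [hm]
      exact ih (F ++ [e])

-- a member of the first-occurrence fold is the head of its key's filtered entries
theorem pv_firsts_head (es : List (String × Int)) (F : List (String × Int)) (p : String) (s : Int)
    (h : (p, s) ∈ es.foldl pvStepF F) :
    (p, s) ∈ F ∨ ((∀ q ∈ F, q.1 ≠ p) ∧ (es.filter (fun e => e.1 == p)).head? = some (p, s)) := by
  induction es generalizing F with
  | nil => exact Or.inl h
  | cons e rest ih =>
    rw [List.foldl_cons] at h
    by_cases hc : F.any (fun q => q.1 == e.1) = true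
    · have hstep : pvStepF F e = F := by unfold pvStepF; simp [hc]
      rw [hstep] at h
      rcases ih F h with h1 | ⟨h2, h3⟩
      · exact Or.inl h1
      · refine Or.inr ⟨h2, ?_⟩
        have hne : (e.1 == p) = false := by
          rcases List.any_eq_true.mp hc with ⟨q, hq, hq1⟩
          have : q.1 = e.1 := by simpa using hq1
          exact beq_eq_false_iff_ne.mpr (this ▸ h2 q hq)
        rw [List.filter_cons, hne]
        simpa using h3
    · have hstep : pvStepF F e = F ++ [e] := by
        unfold pvStepF; simp only [hc]; rfl
      rw [hstep] at h
      have hc' : ∀ q ∈ F, ¬ (q.1 = e.1) := by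
        intro q hq hqe
        exact hc (List.any_eq_true.mpr ⟨q, hq, by simp [hqe]⟩)
      rcases ih (F ++ [e]) h with h1 | ⟨h2, h3⟩
      · rcases List.mem_append.mp h1 with h1' | h1'
        · exact Or.inl h1'
        · have he : e = (p, s) := (List.mem_singleton.mp h1').symm
          refine Or.inr ⟨?_, ?_⟩
          · intro q hq hqp
            exact hc' q hq (by rw [he]; exact hqp)
          · rw [List.filter_cons, he]
            simp
      · refine Or.inr ⟨fun q hq => h2 q (List.mem_append_left _ hq), ?_⟩
        have hne : (e.1 == p) = false :=
          beq_eq_false_iff_ne.mpr (h2 e (List.mem_append_right _ (List.mem_singleton.mpr rfl)))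
        rw [List.filter_cons, hne]
        simpa using h3

-- under pairwise consistency, all entries sharing the head's key equal the head
theorem pv_all_eq (es : List (String × Int)) (p : String) (s : Int)
    (hpw : es.Pairwise (fun a b => a.1 = b.1 → a.2 = b.2))
    (h : (es.filter (fun e => e.1 == p)).head? = some (p, s)) :
    ∀ x ∈ es.filter (fun e => e.1 == p), x = (p, s) := by
  have hpl : (es.filter (fun e => e.1 == p)).Pairwise (fun a b => a.1 = b.1 → a.2 = b.2) :=
    hpw.filter _
  cases hl : es.filter (fun e => e.1 == p) with
  | nil => rw [hl] at h; cases h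
  | cons a t =>
    rw [hl] at h hpl
    have ha : a = (p, s) := by simpa using h
    intro x hx
    rcases List.mem_cons.mp hx with rfl | hx'
    · exact ha
    · have hxk : x.1 = p := by
        have : x ∈ es.filter (fun e => e.1 == p) := hl ▸ List.mem_cons_of_mem _ hx'
        have := List.of_mem_filter this
        simpa using this
      have hR := (List.pairwise_cons.mp hpl).1 x hx'
      have hx2 : x.2 = s := by
        have := hR (by rw [ha, hxk])
        rw [ha] at this; exact this.symm
      exact Prod.ext hxk hx2

-- a nonempty constant list collapses to a singleton set
theorem pv_foldl_add_const (l : List Int) (a : Int) (h : ∀ x ∈ l, x = a) :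
    l.foldl PySem.Set.add [a] = [a] := by
  induction l with
  | nil => rfl
  | cons x t ih =>
    have hx : x = a := h x List.mem_cons_self
    rw [List.foldl_cons, hx]
    have : PySem.Set.add [a] a = [a] := by
      rw [PySem.Set.add_of_mem (List.mem_singleton.mpr rfl)]
    rw [this]
    exact ih (fun y hy => h y (List.mem_cons_of_mem _ hy))

theorem pv_set_const (a : Int) (l : List Int) (h : ∀ x ∈ l, x = a) :
    PySem.Set.ofList (a :: l) = [a] := by
  show (a :: l).foldl PySem.Set.add [] = [a]
  rw [List.foldl_cons]
  have : PySem.Set.add ([] : List Int) a = [a] := rfl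
  rw [this]
  exact pv_foldl_add_const l a h

-- ===== VERDICT (by name: the statement is the Claim_ definition above) =====
theorem get_plate_sizes_spec : Claim_equal_get_plate_sizes := by
  intro plate_maps _ hpre
  unfold Spec_get_plate_sizes
  simp only [get_plate_sizes, get_plate_sizes_alt]
  rw [pvA_loop, pvB_entries]
  set es := pvEntries plate_maps with hes
  have hitems := pv_mainA es PySem.Dict.empty []
      (by simp)
      (by simp [PySem.Dict.empty])
      (by intro e _ q hq; cases hq)
      hpre
  have horder := pv_order es []
  simp only [List.map_nil] at horder
  -- the per-plate facts, for every q in the first-occurrence list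
  have hq_facts : ∀ q ∈ (es.foldl pvStepF []),
      (es.filter (fun e => e.1 == q.1)).map Prod.snd = q.2 :: ((es.filter (fun e => e.1 == q.1)).tail.map Prod.snd) ∧
      (∀ y ∈ (es.filter (fun e => e.1 == q.1)).tail.map Prod.snd, y = q.2) := by
    intro q hq
    rcases pv_firsts_head es [] q.1 q.2 (by simpa using hq) with h1 | ⟨_, h3⟩
    · cases h1
    · have hall := pv_all_eq es q.1 q.2 hpre h3
      cases hl : es.filter (fun e => e.1 == q.1) with
      | nil => rw [hl] at h3; cases h3
      | cons a t =>
        rw [hl] at h3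
        have ha : a = (q.1, q.2) := by simpa using h3
        constructor
        · rw [ha]; rfl
        · intro y hy
          rcases List.mem_map.mp hy with ⟨x, hx, rfl⟩
          have hx' : x ∈ es.filter (fun e => e.1 == q.1) := by
            rw [hl]; exact List.mem_cons_of_mem _ (by simpa using hx)
          have := hall x hx'
          rw [this]
  -- A never raises: every stored set is a singleton
  have hbadA : (((es.foldl pvStepA PySem.Dict.empty).items.filter
      (fun ps => PySem.Set.len ps.2 > 1)).map (·.1)) = [] := by
    rw [hitems]
    have hnil : ((((es.foldl pvStepF [])).map (fun pn => (pn.1, ([pn.2] : List Int)))).filter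
        (fun ps => PySem.Set.len ps.2 > 1)) = [] := by
      apply List.filter_eq_nil_iff.mpr
      intro ps hps
      rcases List.mem_map.mp hps with ⟨pn, _, rfl⟩
      simp [PySem.Set.len]
    rw [hnil]
    rfl
  -- B never raises: every per-plate size set is a singleton
  have hbadB : (((es.foldl pvStepF [])).map Prod.fst).filter (fun p =>
      PySem.Set.len (PySem.Set.ofList ((es.filter (fun q => q.1 == p)).map (·.2))) > 1) = [] := by
    apply List.filter_eq_nil_iff.mpr
    intro p hp
    rcases List.mem_map.mp hp with ⟨q, hq, rfl⟩
    obtain ⟨hhead, htail⟩ := hq_facts q hq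
    rw [show ((es.filter (fun e => e.1 == q.1)).map (·.2)) = (es.filter (fun e => e.1 == q.1)).map Prod.snd from rfl,
       hhead, pv_set_const _ _ htail]
    simp [PySem.Set.len]
  rw [hbadA, horder, hbadB]
  simp only [List.length_nil, gt_iff_lt, lt_self_iff_false, if_false]
  rw [hitems, List.map_map, List.map_map]
  apply List.map_congr_left
  intro q hq
  obtain ⟨hhead, _⟩ := hq_facts q hq
  simp only [Function.comp]
  rw [show ((es.filter (fun e => e.1 == q.1)).map (·.2)) = (es.filter (fun e => e.1 == q.1)).map Prod.snd from rfl, hhead]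
  simp [PySem.List.pyGet?, PySem.List.pyIdx?]
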